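-- pv_equiv track=rewrite | github.com/24rochak/LeetCode | Watering Flowers.py | ncans
-- ===== SOURCE A (Python) =====
-- def ncans(vals, quant1, quant2):
--     i, j = 0, len(vals) - 1
--     ans = 0
--     q1 = 0
--     q2 = 0
--     while i <= j:
--         if i < j:
--             if vals[i] > q1:
--                 ans += 1
--                 q1 = quant1
--             q1 = q1 - vals[i]
--             if vals[j] > q2:
--                 ans += 1
--                 q2 = quant2
--             q2 = q2 - vals[j]
--         elif i == j:
--             if vals[i] > q1 + q2:
--                 ans += 1
--         i += 1
--         j -= 1
--     return ans
-- ===== SOURCE B (Python) =====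
-- def _refills(seq, quant):
--     # Prefix-sum reformulation: a flower k is waterable without refilling iff the
--     # cumulative sum since the last refill stays within the current capacity
--     # (0 before the first refill, quant after).  Returns (refill count, leftover water).
--     P = [0]
--     for v in seq:
--         P.append(P[-1] + v)
--     cnt, base, limit, k = 0, 0, 0, 0
--     while k < len(seq):
--         if P[k + 1] - base <= limit:
--             k += 1
--         else:
--             cnt += 1
--             base = P[k]
--             limit = quant
--             k += 1
--     return cnt, limit - (P[-1] - base)
--
-- def ncans(vals, quant1, quant2):
--     n = len(vals)
--     mid = n // 2
--     c1, r1 = _refills(vals[:mid], quant1)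
--     c2, r2 = _refills(vals[n - mid:][::-1], quant2)
--     ans = c1 + c2
--     if n % 2 == 1 and vals[mid] > r1 + r2:
--         ans += 1
--     return ans
-- ===== Notes on version B (the rewrite author's own statement) =====
-- stated objective: alternative
-- what changed: Replaces A's two-pointer remaining-water simulation by a prefix-sum reformulation: each half's cumulative sums are precomputed once and refills are detected by comparing cumulative segment sums against the current capacity, with the two halves handled by a shared helper and an explicit odd-middle check on the leftovers.
import Mathlib
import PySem

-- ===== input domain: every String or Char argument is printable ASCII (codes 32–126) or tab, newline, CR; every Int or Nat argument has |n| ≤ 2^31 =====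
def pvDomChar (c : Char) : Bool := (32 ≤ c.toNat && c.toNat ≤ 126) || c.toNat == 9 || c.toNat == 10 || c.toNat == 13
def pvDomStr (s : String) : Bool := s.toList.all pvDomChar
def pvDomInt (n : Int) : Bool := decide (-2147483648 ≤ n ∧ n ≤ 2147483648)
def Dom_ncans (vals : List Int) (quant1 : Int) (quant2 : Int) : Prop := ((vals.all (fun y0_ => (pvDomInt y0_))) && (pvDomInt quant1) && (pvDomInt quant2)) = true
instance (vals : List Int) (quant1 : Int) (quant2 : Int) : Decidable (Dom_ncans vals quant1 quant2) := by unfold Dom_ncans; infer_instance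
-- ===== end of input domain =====

-- B replaces A's remaining-water two-pointer simulation by a prefix-sum reformulation:
-- it precomputes cumulative sums once per half and walks refill events by comparing
-- cumulative segment sums against the current capacity (objective: alternative; same O(n)).

-- ===== PORT A =====
-- A's while loop, ported as fuel recursion; fuel = vals.length + 1 bounds the iteration
-- count.  vals[i] / vals[j] are always in range whenever the loop body reads them, so
-- pyGetD's default 0 is never used.
def ncansLoop (vals : List Int) (quant1 quant2 : Int) :
    Nat → Int → Int → Int → Int → Int → Int
  | 0, _, _, ans, _, _ => ans
  | fuel + 1, i, j, ans, q1, q2 =>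
    if i ≤ j then
      if i < j then
        let vi := PySem.List.pyGetD vals i 0
        let s1 := if vi > q1 then (ans + 1, quant1) else (ans, q1)
        let q1' := s1.2 - vi
        let vj := PySem.List.pyGetD vals j 0
        let s2 := if vj > q2 then (s1.1 + 1, quant2) else (s1.1, q2)
        let q2' := s2.2 - vj
        ncansLoop vals quant1 quant2 fuel (i + 1) (j - 1) s2.1 q1' q2'
      else
        let vi := PySem.List.pyGetD vals i 0
        let ans' := if vi > q1 + q2 then ans + 1 else ans
        ncansLoop vals quant1 quant2 fuel (i + 1) (j - 1) ans' q1 q2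
    else ans

def ncans (vals : List Int) (quant1 : Int) (quant2 : Int) : Int :=
  ncansLoop vals quant1 quant2 (vals.length + 1) 0 ((vals.length : Int) - 1) 0 0 0

-- ===== PORT B =====
-- Python's P list built by 'P.append(P[-1] + v)': running value threaded explicitly.
def pyPrefixAux (s : Int) : List Int → List Int
  | [] => []
  | v :: t => (s + v) :: pyPrefixAux (s + v) t

def pyPrefix (l : List Int) : List Int := 0 :: pyPrefixAux 0 l

-- B's while loop over k; P indices are always in range (P has length seq.length + 1),
-- so getD's default 0 is never used; 'P.getD seq.length 0' is Python's P[-1].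
def refillsLoop (seq P : List Int) (quant : Int) (cnt base limit : Int) (k : Nat) : Int × Int :=
  if k < seq.length then
    if P.getD (k + 1) 0 - base ≤ limit then
      refillsLoop seq P quant cnt base limit (k + 1)
    else
      refillsLoop seq P quant (cnt + 1) (P.getD k 0) quant (k + 1)
  else (cnt, limit - (P.getD seq.length 0 - base))
termination_by seq.length - k

def refills (seq : List Int) (quant : Int) : Int × Int :=
  refillsLoop seq (pyPrefix seq) quant 0 0 0 0

def ncans_alt (vals : List Int) (quant1 : Int) (quant2 : Int) : Int :=
  let n := vals.length
  let mid := n / 2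
  let s1 := refills (vals.take mid) quant1
  let s2 := refills ((vals.drop (n - mid)).reverse) quant2
  let ans := s1.1 + s2.1
  if n % 2 == 1 && decide (vals.getD mid 0 > s1.2 + s2.2) then ans + 1 else ans

-- ===== PRECONDITION & SPEC =====
def Spec_ncans (vals : List Int) (quant1 : Int) (quant2 : Int) (out : Int) : Prop := out = ncans_alt vals quant1 quant2
instance (vals : List Int) (quant1 : Int) (quant2 : Int) (out : Int) : Decidable (Spec_ncans vals quant1 quant2 out) := by unfold Spec_ncans; infer_instance

-- ===== CLAIM (what is proved, stated in full; the proofs are below) =====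
def Claim_equal_ncans : Prop := ∀ (vals : List Int) (quant1 : Int) (quant2 : Int), Dom_ncans vals quant1 quant2 → Spec_ncans vals quant1 quant2 (ncans vals quant1 quant2)

-- ===== LEMMAS AND PROOFS =====

-- canonical per-flower watering step used only by the proofs (neither port computes with it)
def waterStep (quant : Int) (s : Int × Int) (v : Int) : Int × Int :=
  let s' := if v > s.2 then (s.1 + 1, quant) else s
  (s'.1, s'.2 - v)

-- canonical form: left fold, right fold, middle check, generalized start state
def Bform (quant1 quant2 : Int) (l : List Int) (ans q1 q2 : Int) : Int :=
  let mid := l.length / 2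
  let s1 := (l.take mid).foldl (waterStep quant1) (ans, q1)
  let s2 := ((l.drop (l.length - mid)).reverse).foldl (waterStep quant2) (s1.1, q2)
  if l.length % 2 == 1 then
    if l.getD mid 0 > s1.2 + s2.2 then s2.1 + 1 else s2.1
  else s2.1

lemma Bform_nil (quant1 quant2 ans q1 q2 : Int) :
    Bform quant1 quant2 [] ans q1 q2 = ans := by
  simp [Bform]

lemma Bform_singleton (quant1 quant2 x ans q1 q2 : Int) :
    Bform quant1 quant2 [x] ans q1 q2 = if x > q1 + q2 then ans + 1 else ans := by
  simp [Bform]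

lemma foldl_waterStep_shift (quant c : Int) :
    ∀ (l : List Int) (a q : Int),
      l.foldl (waterStep quant) (a + c, q) =
        ((l.foldl (waterStep quant) (a, q)).1 + c, (l.foldl (waterStep quant) (a, q)).2) := by
  intro l
  induction l with
  | nil => intro a q; simp
  | cons v t ih =>
      intro a q
      simp only [List.foldl_cons, waterStep]
      by_cases h : v > q
      · simp only [if_pos h]
        have := ih (a + 1) (quant - v)
        simpa [add_right_comm a c 1] using this
      · simp only [if_neg h]
        exact ih a (q - v)

lemma Bform_cons_concat (quant1 quant2 x y : Int) (inner : List Int) (ans q1 q2 : Int) :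
    Bform quant1 quant2 (x :: inner ++ [y]) ans q1 q2 =
    Bform quant1 quant2 inner
      (waterStep quant2 ((waterStep quant1 (ans, q1) x).1, q2) y).1
      (waterStep quant1 (ans, q1) x).2
      (waterStep quant2 ((waterStep quant1 (ans, q1) x).1, q2) y).2 := by
  have hlen : (x :: inner ++ [y]).length = inner.length + 2 := by simp
  have hmid : (inner.length + 2) / 2 = inner.length / 2 + 1 := by omega
  have hpar : (inner.length + 2) % 2 = inner.length % 2 := by omega
  have hdn : (inner.length + 2) - (inner.length / 2 + 1)
      = (inner.length - inner.length / 2) + 1 := by omega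
  have htake : (x :: inner ++ [y]).take (inner.length / 2 + 1)
      = x :: inner.take (inner.length / 2) := by
    rw [List.cons_append, List.take_succ_cons,
      List.take_append_of_le_length (by omega)]
  have hdrop : (x :: inner ++ [y]).drop ((inner.length - inner.length / 2) + 1)
      = inner.drop (inner.length - inner.length / 2) ++ [y] := by
    rw [List.cons_append, List.drop_succ_cons,
      List.drop_append_of_le_length (by omega)]
  have hget : inner.length % 2 = 1 →
      (x :: inner ++ [y]).getD (inner.length / 2 + 1) 0 = inner.getD (inner.length / 2) 0 := by
    intro hp
    rw [List.cons_append, List.getD_cons_succ, List.getD_append _ _ _ _ (by omega)]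
  simp only [Bform, hlen, hmid, hpar, hdn, htake, hdrop, List.reverse_append,
    List.reverse_singleton, List.singleton_append, List.foldl_cons]
  by_cases hy : y > q2
  · have hw : ∀ c : Int, waterStep quant2 (c, q2) y = (c + 1, quant2 - y) := by
      intro c; simp [waterStep, hy]
    simp only [waterStep, if_pos hy]
    by_cases hx : x > q1
    · simp only [if_pos hx]
      rw [foldl_waterStep_shift quant1 1 (inner.take (inner.length / 2)) (ans + 1) (quant1 - x)]
      by_cases hp : inner.length % 2 = 1
      · rw [hget hp]
      · simp [hp]
    · simp only [if_neg hx]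
      rw [foldl_waterStep_shift quant1 1 (inner.take (inner.length / 2)) ans (q1 - x)]
      by_cases hp : inner.length % 2 = 1
      · rw [hget hp]
      · simp [hp]
  · simp only [waterStep, if_neg hy]
    by_cases hx : x > q1 <;>
      [skip; skip] <;> simp only [hx, if_true, if_false] <;>
      (by_cases hp : inner.length % 2 = 1
       · rw [hget hp]
       · simp [hp])

lemma ncansLoop_stop (vals : List Int) (quant1 quant2 : Int) (fuel : Nat)
    (i j ans q1 q2 : Int) (h : j < i) :
    ncansLoop vals quant1 quant2 fuel i j ans q1 q2 = ans := by
  cases fuel with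
  | zero => rfl
  | succ f => simp [ncansLoop, not_le.mpr h]

lemma loop_eq_Bform (vals : List Int) (quant1 quant2 : Int) :
    ∀ (fuel a b : Nat) (ans q1 q2 : Int),
      a + b ≤ vals.length →
      vals.length - a - b ≤ 2 * fuel →
      ncansLoop vals quant1 quant2 fuel (a : Int) ((vals.length : Int) - 1 - (b : Int)) ans q1 q2 =
        Bform quant1 quant2 ((vals.drop a).take (vals.length - a - b)) ans q1 q2 := by
  intro fuel
  induction fuel with
  | zero =>
      intro a b ans q1 q2 hab hf
      have hm : vals.length - a - b = 0 := by omega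
      rw [hm]
      simp [ncansLoop, Bform_nil]
  | succ f ih =>
      intro a b ans q1 q2 hab hf
      by_cases h0 : vals.length ≤ a + b
      · have hm : vals.length - a - b = 0 := by omega
        rw [hm]
        have hij : ((vals.length : Int) - 1 - (b : Int)) < (a : Int) := by omega
        rw [ncansLoop_stop vals quant1 quant2 _ _ _ _ _ _ hij]
        simp [Bform_nil]
      · push Not at h0
        have ha : a < vals.length := by omega
        rcases Nat.lt_or_ge (a + b + 1) vals.length with h2 | h1
        · -- two or more elements left
          have hle : (a : Int) ≤ (vals.length : Int) - 1 - (b : Int) := by omega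
          have hlt : (a : Int) < (vals.length : Int) - 1 - (b : Int) := by omega
          simp only [ncansLoop, if_pos hle, if_pos hlt]
          have hvi : PySem.List.pyGetD vals (a : Int) 0 = vals[a] := by
            rw [PySem.List.pyGetD_natCast, List.getD_eq_getElem vals 0 ha]
          have hjlt : (vals.length : Int) - 1 - (b : Int) < vals.length := by omega
          have hj0 : (0 : Int) ≤ (vals.length : Int) - 1 - (b : Int) := by omega
          have hvj : PySem.List.pyGetD vals ((vals.length : Int) - 1 - (b : Int)) 0
              = vals[vals.length - 1 - b]'(by omega) := by
            rw [PySem.List.pyGetD_eq_getElem _ _ hj0 hjlt]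
            congr 1
            omega
          rw [hvi, hvj]
          have hi' : (a : Int) + 1 = ((a + 1 : Nat) : Int) := by push_cast; ring
          have hj' : (vals.length : Int) - 1 - (b : Int) - 1
              = (vals.length : Int) - 1 - ((b + 1 : Nat) : Int) := by push_cast; ring
          rw [hi', hj', ih (a + 1) (b + 1) _ _ _ (by omega) (by omega)]
          have hsplit : (vals.drop a).take (vals.length - a - b)
              = vals[a] :: ((vals.drop (a + 1)).take (vals.length - (a + 1) - (b + 1)))
                ++ [vals[vals.length - 1 - b]'(by omega)] := by
            have hm : vals.length - a - b = (vals.length - (a + 1) - (b + 1)) + 1 + 1 := by omega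
            rw [List.drop_eq_getElem_cons ha, hm, List.take_succ_cons, List.take_add_one]
            have hk : vals.length - (a + 1) - (b + 1) < (vals.drop (a + 1)).length := by
              simp [List.length_drop]; omega
            rw [List.getElem?_eq_getElem hk]
            have hidx : a + 1 + (vals.length - (a + 1) - (b + 1)) = vals.length - 1 - b := by omega
            simp [List.getElem_drop, hidx]
          rw [hsplit, Bform_cons_concat]
          simp [waterStep]
        · -- exactly one element left
          have hn : vals.length = a + b + 1 := by omega
          have hle : (a : Int) ≤ (vals.length : Int) - 1 - (b : Int) := by omega
          have hnlt : ¬ ((a : Int) < (vals.length : Int) - 1 - (b : Int)) := by omega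
          simp only [ncansLoop, if_pos hle, if_neg hnlt]
          rw [ncansLoop_stop vals quant1 quant2 f _ _ _ _ _ (by omega)]
          have hm1 : vals.length - a - b = 1 := by omega
          have hseg : (vals.drop a).take (vals.length - a - b) = [vals[a]] := by
            rw [hm1, List.drop_eq_getElem_cons ha, List.take_succ_cons, List.take_zero]
          have hvi : PySem.List.pyGetD vals (a : Int) 0 = vals[a] := by
            rw [PySem.List.pyGetD_natCast, List.getD_eq_getElem vals 0 ha]
          rw [hseg, Bform_singleton, hvi]

-- ===== B side: the prefix-sum event loop equals the canonical fold =====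

lemma pyPrefix_getD (l : List Int) :
    ∀ (k : Nat) (s : Int), k ≤ l.length →
      (s :: pyPrefixAux s l).getD k 0 = s + (l.take k).sum := by
  induction l with
  | nil =>
      intro k s hk
      have hk0 : k = 0 := by simpa using hk
      subst hk0; simp
  | cons v t ih =>
      intro k s hk
      cases k with
      | zero => simp
      | succ m =>
          have := ih m (s + v) (by simpa using hk)
          simpa [pyPrefixAux, List.getD_cons_succ, add_assoc] using this

lemma refillsLoop_eq (seq : List Int) (quant : Int) :
    ∀ (k : Nat) (cnt base limit : Int), k ≤ seq.length →
      refillsLoop seq (pyPrefix seq) quant cnt base limit k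
        = (seq.drop k).foldl (waterStep quant) (cnt, limit - ((seq.take k).sum - base)) := by
  intro k
  induction hk : seq.length - k using Nat.strong_induction_on generalizing k with
  | _ n ih =>
    intro cnt base limit hkle
    by_cases h : k < seq.length
    · have hv : seq.drop k = seq[k] :: seq.drop (k + 1) := List.drop_eq_getElem_cons h
      have hPk : (pyPrefix seq).getD k 0 = (seq.take k).sum := by
        simpa [pyPrefix] using pyPrefix_getD seq k 0 hkle
      have hPk1 : (pyPrefix seq).getD (k + 1) 0 = (seq.take (k + 1)).sum := by
        simpa [pyPrefix] using pyPrefix_getD seq (k + 1) 0 (by omega)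
      have hsum1 : (seq.take (k + 1)).sum = (seq.take k).sum + seq[k] := by
        rw [List.sum_take_succ]
      rw [refillsLoop]
      simp only [if_pos h, hPk, hPk1, hsum1]
      by_cases hc : (seq.take k).sum + seq[k] - base ≤ limit
      · rw [if_pos hc, ih (seq.length - (k + 1)) (by omega) (k + 1) rfl cnt base limit (by omega)]
        rw [hv, List.foldl_cons]
        have hstep : waterStep quant (cnt, limit - ((seq.take k).sum - base)) seq[k]
            = (cnt, limit - ((seq.take (k + 1)).sum - base)) := by
          have hng : ¬ (seq[k] > limit - ((seq.take k).sum - base)) := by omega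
          simp [waterStep, hng, hsum1]; ring
        rw [hstep]
      · rw [if_neg hc,
          ih (seq.length - (k + 1)) (by omega) (k + 1) rfl (cnt + 1) ((seq.take k).sum) quant (by omega)]
        rw [hv, List.foldl_cons]
        have hstep : waterStep quant (cnt, limit - ((seq.take k).sum - base)) seq[k]
            = (cnt + 1, quant - ((seq.take (k + 1)).sum - (seq.take k).sum)) := by
          have hg : seq[k] > limit - ((seq.take k).sum - base) := by omega
          simp [waterStep, hg, hsum1]
        rw [hstep]
    · have hk0 : k = seq.length := by omega
      have hP : (pyPrefix seq).getD seq.length 0 = seq.sum := by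
        simpa [pyPrefix] using pyPrefix_getD seq seq.length 0 (le_refl _)
      subst hk0
      rw [refillsLoop, if_neg h, hP]
      simp

lemma refills_eq (seq : List Int) (quant : Int) :
    refills seq quant = seq.foldl (waterStep quant) (0, 0) := by
  have := refillsLoop_eq seq quant 0 0 0 0 (Nat.zero_le _)
  simpa [refills] using this

lemma alt_eq_Bform (vals : List Int) (quant1 quant2 : Int) :
    ncans_alt vals quant1 quant2 = Bform quant1 quant2 vals 0 0 0 := by
  simp only [ncans_alt, Bform, refills_eq]
  set mid := vals.length / 2 with hmid
  set L := vals.take mid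
  set R := (vals.drop (vals.length - mid)).reverse
  set f1 := L.foldl (waterStep quant1) (0, 0) with hf1
  have hshift : R.foldl (waterStep quant2) (f1.1, 0)
      = ((R.foldl (waterStep quant2) (0, 0)).1 + f1.1, (R.foldl (waterStep quant2) (0, 0)).2) := by
    have := foldl_waterStep_shift quant2 f1.1 R 0 0
    simpa using this
  rw [hshift]
  set f2 := R.foldl (waterStep quant2) (0, 0) with hf2
  by_cases hp : vals.length % 2 = 1
  · simp only [hp]
    by_cases hg : vals.getD mid 0 > f1.2 + f2.2
    · simp [add_comm]
    · simp [add_comm]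
  · simp [hp, add_comm]

-- ===== VERDICT (by name: the statement is the Claim_ definition above) =====
theorem ncans_spec : Claim_equal_ncans := by
  intro vals quant1 quant2 _
  unfold Spec_ncans
  have h := loop_eq_Bform vals quant1 quant2 (vals.length + 1) 0 0 0 0 0
    (by omega) (by omega)
  rw [alt_eq_Bform]
  unfold ncans
  simpa using h
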